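-- pv_equiv track=rewrite | github.com/NIBARGERB-HLDPRO/hldpro-governance | scripts/knowledge_base/measure_graphify_usage.py | matched_terms
-- ===== SOURCE A (Python) =====
-- def matched_terms(text: str, tokens: list[str], limit: int = 4) -> list[str]:
--     lowered = text.casefold()
--     matches: list[str] = []
--     for token in tokens:
--         if token in lowered and token not in matches:
--             matches.append(token)
--         if len(matches) == limit:
--             break
--     return matches
-- ===== SOURCE B (Python) =====
-- def matched_terms(text: str, tokens: list[str], limit: int = 4) -> list[str]:
--     lowered = text.casefold()
--     matches = [token for token in dict.fromkeys(tokens) if token in lowered]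
--     return matches if limit < 0 else matches[:limit]
-- ===== Notes on version B (the rewrite author's own statement) =====
-- stated objective: simpler
-- what changed: A's single loop that interleaves dedupe, substring test and a post-append break is replaced by dict.fromkeys to dedupe the tokens once, a filtering comprehension for the substring test, and a slice for the limit.
-- intended difference: When limit == 0 and the first token occurs in the casefolded text, A appends it before its len(matches) == limit check can fire and returns ALL distinct matching tokens, while B returns [], the intended meaning of a limit of 0 (at most 0 matches). — e.g. on matched_terms("a", ["a"], 0): A returns ["a"], B returns []
import Mathlib
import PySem

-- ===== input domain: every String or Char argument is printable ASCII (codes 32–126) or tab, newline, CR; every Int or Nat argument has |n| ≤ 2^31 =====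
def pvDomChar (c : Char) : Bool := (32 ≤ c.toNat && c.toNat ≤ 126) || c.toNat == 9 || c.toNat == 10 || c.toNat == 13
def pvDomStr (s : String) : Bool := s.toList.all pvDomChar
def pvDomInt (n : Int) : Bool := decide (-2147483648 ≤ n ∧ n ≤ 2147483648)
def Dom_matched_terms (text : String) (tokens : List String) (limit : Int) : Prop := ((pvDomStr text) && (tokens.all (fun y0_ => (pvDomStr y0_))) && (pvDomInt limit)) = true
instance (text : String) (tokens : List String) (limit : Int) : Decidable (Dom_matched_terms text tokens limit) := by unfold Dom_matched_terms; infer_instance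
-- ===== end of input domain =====

-- B replaces A's break/dedupe loop by dict.fromkeys + a filtering comprehension + a slice (simpler);
-- str.casefold is ported as PySem.Str.lower, exact on the ASCII domain.

-- ===== PORT A =====
-- the 'for token in tokens' loop with its conditional append and the 'break' on len(matches) == limit
def matchLoopA (lowered : String) (limit : Int) : List String → List String → List String
  | [], acc => acc
  | token :: rest, acc =>
    let m := if PySem.Str.isIn token lowered && !acc.contains token then acc ++ [token] else acc
    if (m.length : Int) = limit then m else matchLoopA lowered limit rest m

def matched_terms (text : String) (tokens : List String) (limit : Int) : List String :=
  matchLoopA (PySem.Str.lower text) limit tokens []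

-- ===== PORT B =====
def matched_terms_alt (text : String) (tokens : List String) (limit : Int) : List String :=
  let lowered := PySem.Str.lower text
  let found := (PySem.List.dedup tokens).filter (fun token => PySem.Str.isIn token lowered)
  if limit < 0 then found else PySem.List.slice found none (some limit)

-- ===== PRECONDITION & SPEC =====
-- When limit = 0 and the first token occurs in the casefolded text, A appends it before its
-- 'len(matches) == limit' check can ever fire and so returns ALL distinct matching tokens;
-- B returns [] there, which is what a limit of 0 means (at most 0 matches).
def D_matched_terms (text : String) (tokens : List String) (limit : Int) : Prop :=
  limit = 0 ∧ tokens ≠ [] ∧ PySem.Str.isIn (tokens.headD "") (PySem.Str.lower text) = true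
instance (text : String) (tokens : List String) (limit : Int) : Decidable (D_matched_terms text tokens limit) := by unfold D_matched_terms; infer_instance

def Spec_matched_terms (text : String) (tokens : List String) (limit : Int) (out : List String) : Prop := ¬ D_matched_terms text tokens limit → out = matched_terms_alt text tokens limit
instance (text : String) (tokens : List String) (limit : Int) (out : List String) : Decidable (Spec_matched_terms text tokens limit out) := by unfold Spec_matched_terms; infer_instance

def pvDiffWitness_matched_terms : String × List String × Int := ("a", ["a"], 0)
def pvDiffWitnessOut_matched_terms : (List String) × (List String) := (["a"], [])

-- ===== CLAIM (what is proved, stated in full; the proofs are below) =====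
def Claim_unchanged_matched_terms : Prop := ∀ (text : String) (tokens : List String) (limit : Int), Dom_matched_terms text tokens limit → Spec_matched_terms text tokens limit (matched_terms text tokens limit)
def Claim_changed_matched_terms : Prop := Dom_matched_terms (pvDiffWitness_matched_terms.1) (pvDiffWitness_matched_terms.2.1) (pvDiffWitness_matched_terms.2.2) ∧ D_matched_terms (pvDiffWitness_matched_terms.1) (pvDiffWitness_matched_terms.2.1) (pvDiffWitness_matched_terms.2.2) ∧ matched_terms (pvDiffWitness_matched_terms.1) (pvDiffWitness_matched_terms.2.1) (pvDiffWitness_matched_terms.2.2) = pvDiffWitnessOut_matched_terms.1 ∧ matched_terms_alt (pvDiffWitness_matched_terms.1) (pvDiffWitness_matched_terms.2.1) (pvDiffWitness_matched_terms.2.2) = pvDiffWitnessOut_matched_terms.2 ∧ pvDiffWitnessOut_matched_terms.1 ≠ pvDiffWitnessOut_matched_terms.2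
def Claim_exact_matched_terms : Prop := ∀ (text : String) (tokens : List String) (limit : Int), Dom_matched_terms text tokens limit → D_matched_terms text tokens limit → matched_terms text tokens limit ≠ matched_terms_alt text tokens limit

-- ===== LEMMAS AND PROOFS =====

-- dict.fromkeys with an accumulator: foldl Set.add over s keeps s and appends the deduped new keys
lemma foldl_setAdd_acc (ts s : List String) :
    ts.foldl PySem.Set.add s = s ++ (PySem.List.dedup ts).filter (fun x => !s.contains x) := by
  induction ts generalizing s with
  | nil => simp [PySem.List.dedup, PySem.Set.ofList]
  | cons t ts ih =>
    have hd : PySem.List.dedup (t :: ts) = ts.foldl PySem.Set.add (PySem.Set.add [] t) := by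
      simp [PySem.List.dedup, PySem.Set.ofList_eq_foldl, List.foldl]
    rw [List.foldl_cons, ih (PySem.Set.add s t), hd, ih (PySem.Set.add [] t)]
    have h2 : PySem.Set.add ([] : List String) t = [t] := by
      simp [PySem.Set.add, PySem.Set.contains]
    rw [h2]
    by_cases hts : t ∈ s
    · have h1 : PySem.Set.add s t = s := by simp [PySem.Set.add, PySem.Set.contains, hts]
      rw [h1]
      simp only [List.filter_append, List.filter_cons, List.filter_filter, List.filter_nil]
      have hct : s.contains t = true := by simpa using hts
      simp only [hct, Bool.not_true]
      rw [if_neg (by simp)]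
      simp only [List.nil_append]
      congr 1
      apply List.filter_congr
      intro x _
      by_cases hxs : x ∈ s
      · simp [hxs]
      · have hxt : x ≠ t := fun h => hxs (h ▸ hts)
        simp [hxs, hxt]
    · have h1 : PySem.Set.add s t = s ++ [t] := by simp [PySem.Set.add, PySem.Set.contains, hts]
      rw [h1]
      have hct : s.contains t = false := by simpa using hts
      simp only [List.filter_append, List.filter_cons, List.filter_filter, List.filter_nil]
      simp only [hct, Bool.not_false]
      rw [if_pos (by simp)]
      rw [List.append_assoc]
      congr 1
      rw [List.singleton_append]
      congr 1
      apply List.filter_congr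
      intro x _
      by_cases hxt : x = t
      · subst hxt
        simp [hts]
      · simp [hxt]

-- list(dict.fromkeys(t :: ts)) keeps t and the later first occurrences other than t
lemma dedup_cons (t : String) (ts : List String) :
    PySem.List.dedup (t :: ts) = t :: (PySem.List.dedup ts).filter (fun x => !(x == t)) := by
  have h2 : PySem.Set.add ([] : List String) t = [t] := by simp [PySem.Set.add, PySem.Set.contains]
  have hd : PySem.List.dedup (t :: ts) = ts.foldl PySem.Set.add (PySem.Set.add [] t) := by
    simp [PySem.List.dedup, PySem.Set.ofList_eq_foldl, List.foldl]
  rw [hd, h2, foldl_setAdd_acc ts [t]]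
  simp only [List.singleton_append, List.cons.injEq, true_and]
  apply List.filter_congr
  intro x _
  simp [beq_eq_decide]

-- A's loop never drops what is already in matches
lemma matchLoopA_prefix (lowered : String) (limit : Int) (ts m : List String) :
    m <+: matchLoopA lowered limit ts m := by
  induction ts generalizing m with
  | nil => simp [matchLoopA]
  | cons t ts ih =>
    simp only [matchLoopA]
    set m' := if PySem.Str.isIn t lowered && !m.contains t then m ++ [t] else m with hm'
    have hmm' : m <+: m' := by
      rw [hm']; split
      · exact ⟨[t], rfl⟩
      · exact List.prefix_refl m
    split
    · exact hmm'
    · exact hmm'.trans (ih m')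

-- negative limit: the break never fires; the loop appends every new distinct matching token
lemma matchLoopA_neg (lowered : String) (limit : Int) (hlim : limit < 0) (ts m : List String) :
    matchLoopA lowered limit ts m
      = m ++ (PySem.List.dedup ts).filter
          (fun x => PySem.Str.isIn x lowered && !m.contains x) := by
  induction ts generalizing m with
  | nil => simp [matchLoopA, PySem.List.dedup, PySem.Set.ofList]
  | cons t ts ih =>
    simp only [matchLoopA]
    rw [dedup_cons, List.filter_cons, List.filter_filter]
    by_cases hc : (PySem.Str.isIn t lowered && !m.contains t) = true
    · rw [if_pos hc, if_neg (by have := List.length_append (as := m) (bs := [t]); omega),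
        ih (m ++ [t]), if_pos hc]
      rw [List.append_assoc, List.singleton_append]
      congr 2
      apply List.filter_congr
      intro x _
      by_cases hxt : x = t
      · subst hxt
        simp
      · simp [hxt]
    · rw [if_neg hc, if_neg (by omega), ih m, if_neg hc]
      congr 1
      apply List.filter_congr
      intro x _
      by_cases hxt : x = t
      · subst hxt
        simp only [beq_self_eq_true, Bool.not_true, Bool.and_false]
        simpa using hc
      · simp [hxt]

-- headroom left: the loop returns m plus the first (limit - len m) new distinct matching tokens
lemma matchLoopA_pos (lowered : String) (limit : Int) (ts : List String) :
    ∀ m : List String, (m.length : Int) < limit →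
    matchLoopA lowered limit ts m
      = m ++ ((PySem.List.dedup ts).filter
          (fun x => PySem.Str.isIn x lowered && !m.contains x)).take (limit - m.length).toNat := by
  induction ts with
  | nil => intro m _; simp [matchLoopA, PySem.List.dedup, PySem.Set.ofList]
  | cons t ts ih =>
    intro m hm
    simp only [matchLoopA]
    rw [dedup_cons, List.filter_cons, List.filter_filter]
    by_cases hc : (PySem.Str.isIn t lowered && !m.contains t) = true
    · rw [if_pos hc, if_pos hc]
      have hfc : (PySem.List.dedup ts).filter
            (fun x => (PySem.Str.isIn x lowered && !m.contains x) && !(x == t))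
          = (PySem.List.dedup ts).filter
            (fun x => PySem.Str.isIn x lowered && !(m ++ [t]).contains x) := by
        apply List.filter_congr
        intro x _
        by_cases hxt : x = t
        · subst hxt
          simp
        · simp [hxt]
      by_cases hbr : ((m ++ [t]).length : Int) = limit
      · rw [if_pos hbr]
        have h1 : (limit - m.length).toNat = 1 := by
          have hl : ((m ++ [t]).length : Int) = (m.length : Int) + 1 := by simp
          omega
        rw [h1, List.take_succ_cons, List.take_zero]
      · have hlt : ((m ++ [t]).length : Int) < limit := by
          have hl : ((m ++ [t]).length : Int) = (m.length : Int) + 1 := by simp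
          omega
        rw [if_neg hbr, ih (m ++ [t]) hlt, hfc]
        have htake : (limit - m.length).toNat = (limit - (m ++ [t]).length).toNat + 1 := by
          have hl : ((m ++ [t]).length : Int) = (m.length : Int) + 1 := by simp
          omega
        rw [htake, List.take_succ_cons]
        simp [List.append_assoc]
    · rw [if_neg hc, if_neg (by omega), ih m hm, if_neg hc]
      congr 2
      apply List.filter_congr
      intro x _
      by_cases hxt : x = t
      · subst hxt
        simp only [beq_self_eq_true, Bool.not_true, Bool.and_false]
        simpa using hc
      · simp [hxt]

-- ===== VERDICT (by name: the statement is the Claim_ definition above) =====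
theorem matched_terms_spec : Claim_unchanged_matched_terms := by
  intro text tokens limit _ hD
  unfold matched_terms matched_terms_alt
  set lowered := PySem.Str.lower text with hlw
  rcases lt_trichotomy limit 0 with hlim | hlim | hlim
  · rw [matchLoopA_neg lowered limit hlim tokens [], if_pos hlim]
    simp
  · subst hlim
    unfold D_matched_terms at hD
    rw [not_and_or, not_and_or] at hD
    rw [if_neg (by omega), PySem.List.slice_to _ le_rfl]
    simp only [Int.toNat_zero, List.take_zero]
    match tokens with
    | [] => simp [matchLoopA]
    | t :: ts =>
      have hni : PySem.Str.isIn t (PySem.Str.lower text) = false := by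
        rcases hD with h | h | h
        · exact absurd rfl h
        · exact absurd (by simp) h
        · simpa using h
      rw [← hlw] at hni
      have hni2 : PySem.Chars.isIn t.toList lowered.toList = false := by simpa using hni
      simp [matchLoopA, hni2]
  · rw [matchLoopA_pos lowered limit tokens [] (by simpa using hlim),
      if_neg (by omega), PySem.List.slice_to _ (le_of_lt hlim)]
    simp

theorem matched_terms_changed : Claim_changed_matched_terms := by
  unfold Claim_changed_matched_terms; decide

theorem matched_terms_tight : Claim_exact_matched_terms := by
  intro text tokens limit _ hD
  obtain ⟨hlim, hne, hin⟩ := hD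
  subst hlim
  match tokens, hne with
  | t :: ts, _ =>
    simp only [List.headD_cons] at hin
    have hB : matched_terms_alt text (t :: ts) 0 = [] := by
      unfold matched_terms_alt
      rw [if_neg (by omega), PySem.List.slice_to _ le_rfl]
      simp
    intro heq
    have hA : matched_terms text (t :: ts) 0 ≠ [] := by
      unfold matched_terms
      simp only [matchLoopA, hin, List.contains_nil, Bool.not_false, Bool.and_self, if_true,
        List.nil_append]
      rw [if_neg (by simp)]
      intro h
      have hp := matchLoopA_prefix (PySem.Str.lower text) 0 ts [t]
      rw [h] at hp
      simp at hp
    exact hA (heq.trans hB)
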